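-- pv_equiv track=rewrite | github.com/Kwak-Jin/IAIA | Project/Robot Automation/source/gomoku/pv_mcts.py | is_same_score
-- ===== SOURCE A (Python) =====
-- def is_same_score(scores):
--     temp_score = 0
--     for score in scores:
--         if temp_score == 0 and score > 0:
--             temp_score = score
--             continue
--
--         if score > 0 and temp_score != score:
--             return False
--
--     return True
-- ===== SOURCE B (Python) =====
-- def is_same_score(scores):
--     return len({s for s in scores if s > 0}) <= 1
-- ===== Notes on version B (the rewrite author's own statement) =====
-- stated objective: simpler
-- what changed: Replaces the sentinel-state scan with an early return by collecting the distinct positive scores into a set and checking its cardinality is at most 1.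
import Mathlib
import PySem

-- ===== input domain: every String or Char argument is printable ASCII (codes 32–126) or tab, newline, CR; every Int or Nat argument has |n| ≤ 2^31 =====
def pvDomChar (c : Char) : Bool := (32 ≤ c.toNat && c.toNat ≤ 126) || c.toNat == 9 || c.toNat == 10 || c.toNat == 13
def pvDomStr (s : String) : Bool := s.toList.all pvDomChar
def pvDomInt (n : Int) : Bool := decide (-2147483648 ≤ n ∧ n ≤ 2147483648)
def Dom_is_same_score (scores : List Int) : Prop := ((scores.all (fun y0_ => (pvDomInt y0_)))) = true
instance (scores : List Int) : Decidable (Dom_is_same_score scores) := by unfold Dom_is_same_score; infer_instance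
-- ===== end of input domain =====

-- B replaces A's sentinel-state scan (early return on a mismatching positive) with
-- collecting the distinct positive scores into a set and checking its size is ≤ 1 (objective: simpler).

-- ===== PORT A =====
-- the for-loop over scores with the running temp_score sentinel and the early `return False`
def isSameScoreLoop (temp : Int) : List Int → Bool
  | [] => true
  | score :: rest =>
    if temp == 0 && decide (0 < score) then isSameScoreLoop score rest
    else if decide (0 < score) && temp != score then false
    else isSameScoreLoop temp rest

def is_same_score (scores : List Int) : Bool := isSameScoreLoop 0 scores

-- ===== PORT B =====
def is_same_score_alt (scores : List Int) : Bool :=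
  decide (PySem.Set.len (PySem.Set.ofList (scores.filter (fun s => decide (0 < s)))) ≤ 1)

-- ===== PRECONDITION & SPEC =====
def Spec_is_same_score (scores : List Int) (out : Bool) : Prop := out = is_same_score_alt scores
instance (scores : List Int) (out : Bool) : Decidable (Spec_is_same_score scores out) := by unfold Spec_is_same_score; infer_instance

-- ===== CLAIM (what is proved, stated in full; the proofs are below) =====
def Claim_equal_is_same_score : Prop := ∀ (scores : List Int), Dom_is_same_score scores → Spec_is_same_score scores (is_same_score scores)

-- ===== LEMMAS AND PROOFS =====

-- once temp is a fixed positive score, the loop just checks every later positive equals it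
theorem loop_pos (xs : List Int) (temp : Int) (h : 0 < temp) :
    isSameScoreLoop temp xs = decide (∀ s ∈ xs, 0 < s → s = temp) := by
  induction xs with
  | nil => simp [isSameScoreLoop]
  | cons x xs ih =>
    have ht : (temp == 0) = false := by simp; omega
    by_cases hx : 0 < x
    · by_cases hxt : temp = x
      · subst hxt; simp [isSameScoreLoop, ht, hx, ih]
      · have hL : isSameScoreLoop temp (x :: xs) = false := by
          simp [isSameScoreLoop, ht, hx, hxt]
        rw [hL]
        refine (decide_eq_false ?_).symm
        intro h'
        exact hxt (h' x (by simp) hx).symm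
    · simp [isSameScoreLoop, ht, hx, ih]

theorem mem_foldl_add_init (l : List Int) (s : List Int) (a : Int) (h : a ∈ s) :
    a ∈ l.foldl PySem.Set.add s := by
  induction l generalizing s with
  | nil => exact h
  | cons x l ih => exact ih _ ((PySem.Set.mem_add _ _ _).mpr (Or.inl h))

theorem mem_foldl_add_elem (l : List Int) (s : List Int) (a : Int) (h : a ∈ l) :
    a ∈ l.foldl PySem.Set.add s := by
  induction l generalizing s with
  | nil => simp at h
  | cons x l ih =>
    rcases List.mem_cons.mp h with h' | h'
    · subst h'
      simp only [List.foldl]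
      exact mem_foldl_add_init l _ a ((PySem.Set.mem_add _ _ _).mpr (Or.inr rfl))
    · exact ih _ h'

theorem foldl_add_singleton (l : List Int) (x : Int)
    (h : ∀ y ∈ l, y = x) : l.foldl PySem.Set.add [x] = [x] := by
  induction l with
  | nil => rfl
  | cons y l ih =>
    have hy : y = x := h y (by simp)
    subst hy
    have hone : PySem.Set.add [y] y = [y] := by simp [PySem.Set.add, PySem.Set.contains]
    simpa [hone] using ih (fun z hz => h z (by simp [hz]))

theorem len_le_one_iff (l : List Int) (x : Int) :
    (((l.foldl PySem.Set.add [x]).length : Int) ≤ 1) ↔ ∀ y ∈ l, y = x := by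
  constructor
  · intro hlen y hy
    by_contra hne
    have hx' : x ∈ l.foldl PySem.Set.add [x] := mem_foldl_add_init _ _ _ (by simp)
    have hy' : y ∈ l.foldl PySem.Set.add [x] := mem_foldl_add_elem _ _ _ hy
    match hL : l.foldl PySem.Set.add [x] with
    | [] => rw [hL] at hx'; simp at hx'
    | [z] =>
      rw [hL] at hx' hy'
      simp at hx' hy'
      exact hne (hy'.trans hx'.symm)
    | z :: w :: rest =>
      rw [hL] at hlen
      simp at hlen
      omega
  · intro h
    rw [foldl_add_singleton l x h]
    simp

theorem main_eq (scores : List Int) :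
    isSameScoreLoop 0 scores = is_same_score_alt scores := by
  unfold is_same_score_alt
  induction scores with
  | nil => simp [isSameScoreLoop, PySem.Set.len, PySem.Set.ofList]
  | cons x xs ih =>
    by_cases hx : 0 < x
    · have hA : isSameScoreLoop 0 (x :: xs) = isSameScoreLoop x xs := by
        simp [isSameScoreLoop, hx]
      rw [hA, loop_pos xs x hx]
      have hf : (x :: xs).filter (fun s => decide (0 < s)) = x :: xs.filter (fun s => decide (0 < s)) := by
        simp [List.filter, hx]
      rw [hf]
      have hof : PySem.Set.ofList (x :: xs.filter (fun s => decide (0 < s)))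
           = (xs.filter (fun s => decide (0 < s))).foldl PySem.Set.add [x] := by
        simp [PySem.Set.ofList_eq_foldl, List.foldl, PySem.Set.add]
      rw [hof]
      simp only [PySem.Set.len]
      rw [decide_eq_decide.mpr]
      constructor
      · intro h
        refine (len_le_one_iff (xs.filter (fun s => decide (0 < s))) x).mpr ?_
        intro y hy
        have hm := List.mem_filter.mp hy
        exact h y hm.1 (by simpa using hm.2)
      · intro h s hs hspos
        exact (len_le_one_iff (xs.filter (fun s => decide (0 < s))) x).mp h s
          (List.mem_filter.mpr ⟨hs, by simpa using hspos⟩)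
    · have hA : isSameScoreLoop 0 (x :: xs) = isSameScoreLoop 0 xs := by
        simp [isSameScoreLoop, hx]
      have hf : (x :: xs).filter (fun s => decide (0 < s)) = xs.filter (fun s => decide (0 < s)) := by
        simp [List.filter, hx]
      rw [hA, hf]
      exact ih

-- ===== VERDICT (by name: the statement is the Claim_ definition above) =====
theorem is_same_score_spec : Claim_equal_is_same_score := by
  intro scores _
  show is_same_score scores = is_same_score_alt scores
  exact main_eq scores
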